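-- pv_equiv track=rewrite | github.com/SidekickMove/applicant-screener | core_logic.py | phrase_in_tokens
-- ===== SOURCE A (Python) =====
-- def phrase_in_tokens(phrase_tokens, pdf_tokens, pdf_filename=None, phrase=None, row_index=None):
--     n = len(phrase_tokens)
--     if n == 0:
--         return False
--     for i in range(len(pdf_tokens) - n + 1):
--         segment = pdf_tokens[i : i + n]
--         if segment == phrase_tokens:
--             return True
--     return False
-- ===== SOURCE B (Python) =====
-- def _is_prefix(p, s):
--     for a, b in zip(p, s):
--         if a != b:
--             return False
--     return True
--
-- def phrase_in_tokens(phrase_tokens, pdf_tokens, pdf_filename=None, phrase=None, row_index=None):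
--     if not phrase_tokens:
--         return False
--     rest = pdf_tokens
--     while len(phrase_tokens) <= len(rest):
--         if _is_prefix(phrase_tokens, rest):
--             return True
--         rest = rest[1:]
--     return False
-- ===== Notes on version B (the rewrite author's own statement) =====
-- stated objective: alternative
-- what changed: replaced the index loop that materialises and compares an n-element slice at every position by a structural scan over the suffixes of pdf_tokens with an early-exit element-wise prefix test (no slice allocation, comparison stops at the first mismatch)
import Mathlib
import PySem

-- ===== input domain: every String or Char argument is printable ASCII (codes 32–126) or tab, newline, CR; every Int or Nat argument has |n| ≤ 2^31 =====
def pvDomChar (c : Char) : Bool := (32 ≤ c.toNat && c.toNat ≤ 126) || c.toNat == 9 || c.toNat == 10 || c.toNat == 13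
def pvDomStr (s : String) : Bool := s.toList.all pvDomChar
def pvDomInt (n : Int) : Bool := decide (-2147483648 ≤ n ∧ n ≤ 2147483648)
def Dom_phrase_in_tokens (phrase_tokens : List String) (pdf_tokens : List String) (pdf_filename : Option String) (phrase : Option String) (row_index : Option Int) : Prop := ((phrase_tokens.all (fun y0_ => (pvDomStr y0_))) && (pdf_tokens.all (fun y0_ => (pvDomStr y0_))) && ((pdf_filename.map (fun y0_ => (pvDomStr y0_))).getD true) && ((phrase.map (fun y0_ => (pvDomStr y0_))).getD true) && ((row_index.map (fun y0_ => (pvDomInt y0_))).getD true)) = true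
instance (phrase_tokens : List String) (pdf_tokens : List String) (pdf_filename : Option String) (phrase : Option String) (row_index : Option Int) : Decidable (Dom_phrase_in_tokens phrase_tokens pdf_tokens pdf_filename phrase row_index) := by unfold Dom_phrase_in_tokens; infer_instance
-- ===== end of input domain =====

-- B replaces A's index loop with slice comparison by a structural scan over suffixes
-- with an early-exit element-wise prefix test; return values proved equal on the domain.


-- ===== PORT A =====
-- for i in range(len(pdf_tokens) - n + 1): if pdf_tokens[i:i+n] == phrase_tokens: return True
def phrase_in_tokens (phrase_tokens : List String) (pdf_tokens : List String) (pdf_filename : Option String) (phrase : Option String) (row_index : Option Int) : Bool :=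
  let n : Int := phrase_tokens.length
  if n = 0 then false
  else
    (PySem.List.pyRange 0 ((pdf_tokens.length : Int) - n + 1) 1).any
      (fun i => PySem.List.slice pdf_tokens (some i) (some (i + n)) == phrase_tokens)

-- ===== PORT B =====
-- early-exit zip comparison: all(a == b for a, b in zip(p, s))
def pvZipAll : List String → List String → Bool
  | a :: p, b :: s => a == b && pvZipAll p s
  | _, _ => true

-- while len(phrase_tokens) <= len(rest): if _is_prefix(...): return True; rest = rest[1:]
def pvScan (p : List String) : List String → Bool
  | [] => if p.length ≤ 0 then pvZipAll p [] else false
  | b :: t => if p.length ≤ (b :: t).length then pvZipAll p (b :: t) || pvScan p t else false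

def phrase_in_tokens_alt (phrase_tokens : List String) (pdf_tokens : List String) (pdf_filename : Option String) (phrase : Option String) (row_index : Option Int) : Bool :=
  if phrase_tokens.isEmpty then false else pvScan phrase_tokens pdf_tokens

-- ===== PRECONDITION & SPEC =====
def Spec_phrase_in_tokens (phrase_tokens : List String) (pdf_tokens : List String) (pdf_filename : Option String) (phrase : Option String) (row_index : Option Int) (out : Bool) : Prop := out = phrase_in_tokens_alt phrase_tokens pdf_tokens pdf_filename phrase row_index
instance (phrase_tokens : List String) (pdf_tokens : List String) (pdf_filename : Option String) (phrase : Option String) (row_index : Option Int) (out : Bool) : Decidable (Spec_phrase_in_tokens phrase_tokens pdf_tokens pdf_filename phrase row_index out) := by unfold Spec_phrase_in_tokens; infer_instance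

-- ===== CLAIM (what is proved, stated in full; the proofs are below) =====
def Claim_equal_phrase_in_tokens : Prop := ∀ (phrase_tokens : List String) (pdf_tokens : List String) (pdf_filename : Option String) (phrase : Option String) (row_index : Option Int), Dom_phrase_in_tokens phrase_tokens pdf_tokens pdf_filename phrase row_index → Spec_phrase_in_tokens phrase_tokens pdf_tokens pdf_filename phrase row_index (phrase_in_tokens phrase_tokens pdf_tokens pdf_filename phrase row_index)

-- ===== LEMMAS AND PROOFS =====

-- zip-all is the prefix relation once p is no longer than s
theorem pvZipAll_iff (p s : List String) (h : p.length ≤ s.length) :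
    pvZipAll p s = true ↔ p <+: s := by
  induction p generalizing s with
  | nil => simp [pvZipAll]
  | cons a p ih =>
    cases s with
    | nil => simp at h
    | cons b s =>
      simp only [pvZipAll, Bool.and_eq_true, beq_iff_eq, List.cons_prefix_cons]
      simp only [List.length_cons, Nat.add_le_add_iff_right] at h
      exact and_congr Iff.rfl (ih s h)

theorem pvScan_iff (p : List String) (hp : p ≠ []) (l : List String) :
    pvScan p l = true ↔ p <:+: l := by
  induction l with
  | nil =>
    have h0 : ¬ p.length ≤ 0 := by cases p <;> simp_all
    constructor
    · intro h; simp [pvScan, h0] at h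
    · intro h; exact absurd (List.eq_nil_of_infix_nil h) hp
  | cons b t ih =>
    by_cases hlen : p.length ≤ (b :: t).length
    · simp only [pvScan, if_pos hlen, Bool.or_eq_true, ih,
        pvZipAll_iff p (b :: t) hlen, List.infix_cons_iff]
    · simp only [pvScan, if_neg hlen]
      constructor
      · intro h; simp at h
      · intro h
        exact absurd (List.IsInfix.length_le h) hlen

theorem dropTake_infix (l p : List String) (i : ℕ)
    (h : (l.drop i).take p.length = p) : p <:+: l := by
  rw [List.infix_iff_prefix_suffix]
  exact ⟨l.drop i, h ▸ List.take_prefix _ _, List.drop_suffix i l⟩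

theorem infix_exists_dropTake (l p : List String) (h : p <:+: l) :
    ∃ i : ℕ, i + p.length ≤ l.length ∧ (l.drop i).take p.length = p := by
  obtain ⟨s, t, rfl⟩ := h
  refine ⟨s.length, by simp only [List.length_append]; omega, ?_⟩
  rw [List.append_assoc, List.drop_left' rfl, List.take_left' rfl]

-- A's loop is also the infix relation (for nonempty p)
theorem portA_iff (p l : List String) :
    ((PySem.List.pyRange 0 ((l.length : Int) - (p.length : Int) + 1) 1).any
      (fun i => PySem.List.slice l (some i) (some (i + (p.length : Int))) == p)) = true
      ↔ p <:+: l := by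
  rw [List.any_eq_true]
  constructor
  · rintro ⟨i, hmem, hi⟩
    rw [PySem.List.mem_pyRange_one] at hmem
    obtain ⟨h0, hlt⟩ := hmem
    rw [beq_iff_eq] at hi
    rw [PySem.List.slice_toNat l h0 (by omega)] at hi
    have hn : (i + (p.length : Int)).toNat - i.toNat = p.length := by omega
    rw [hn] at hi
    exact dropTake_infix l p i.toNat hi
  · intro h
    obtain ⟨i, hle, hi⟩ := infix_exists_dropTake l p h
    refine ⟨(i : Int), ?_, ?_⟩
    · rw [PySem.List.mem_pyRange_one]
      constructor
      · exact_mod_cast Int.natCast_nonneg i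
      · omega
    · rw [beq_iff_eq]
      rw [show ((i : Int) + (p.length : Int)) = ((i + p.length : ℕ) : Int) by push_cast; ring]
      rw [PySem.List.slice_natCast]
      rw [show i + p.length - i = p.length by omega]
      exact hi

-- ===== VERDICT (by name: the statement is the Claim_ definition above) =====
theorem phrase_in_tokens_spec : Claim_equal_phrase_in_tokens := by
  intro p l f ph r _
  unfold Spec_phrase_in_tokens phrase_in_tokens phrase_in_tokens_alt
  by_cases hp : p = []
  · subst hp; simp
  · rw [if_neg (by simpa using hp), if_neg (by simp [List.isEmpty_iff, hp])]
    rw [Bool.eq_iff_iff, portA_iff p l, pvScan_iff p hp l]
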